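-- pv_equiv track=rewrite | github.com/nzmattgrant/ZebraFishDataAnalysis | GraphData.py | get_night_and_day_label_count
-- ===== SOURCE A (Python) =====
-- def get_night_and_day_label_count(x_ticks):
--     label_index_dict = {}
--     previous_label = x_ticks[0]
--     label_index = 0
--     for index, x_tick in enumerate(x_ticks):
--         current_label = x_tick
--         is_label_change = previous_label != current_label
--         if is_label_change:
--             label_index = label_index + 1
--         if len(label_index_dict) <= label_index:
--             label_index_dict[label_index] = 0
--         label_index_dict[label_index] = label_index_dict[label_index] + 1
--         previous_label = current_label
--     return label_index_dict
-- ===== SOURCE B (Python) =====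
-- def get_night_and_day_label_count(x_ticks):
--     # find the start index of each run (boundaries), then take pairwise differences
--     n = len(x_ticks)
--     bounds = [i for i in range(n) if i == 0 or x_ticks[i] != x_ticks[i - 1]]
--     bounds.append(n)
--     return {i: b - a for i, (a, b) in enumerate(zip(bounds, bounds[1:]))}
-- ===== Notes on version B (the rewrite author's own statement) =====
-- stated objective: alternative
-- what changed: Instead of A's previous_label/label_index/dict-size state machine, B computes the run start boundaries by index arithmetic (positions i with x_ticks[i] != x_ticks[i-1]) and takes pairwise differences of the boundary list; Pre_ excludes only the empty list, on which A raises IndexError while B returns {}.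
import Mathlib
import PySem

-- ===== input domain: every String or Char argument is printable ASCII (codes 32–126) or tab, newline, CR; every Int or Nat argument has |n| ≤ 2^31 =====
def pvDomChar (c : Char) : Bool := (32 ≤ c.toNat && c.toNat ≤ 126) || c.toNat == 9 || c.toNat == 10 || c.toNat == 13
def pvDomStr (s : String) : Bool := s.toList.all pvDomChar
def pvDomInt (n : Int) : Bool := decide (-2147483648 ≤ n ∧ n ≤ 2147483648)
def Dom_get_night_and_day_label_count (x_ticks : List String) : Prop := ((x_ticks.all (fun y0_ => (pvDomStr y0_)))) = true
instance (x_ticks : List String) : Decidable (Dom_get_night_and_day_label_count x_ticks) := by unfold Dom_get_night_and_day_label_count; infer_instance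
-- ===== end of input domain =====

-- B replaces A's previous_label/label_index/dict-size state machine with boundary
-- arithmetic: it collects the run start indices (i = 0 or x_ticks[i] != x_ticks[i-1])
-- and takes pairwise differences; same return value on every non-empty input
-- (A raises IndexError on [], where B returns {}).

-- ===== PORT A =====
-- one iteration of A's 'for index, x_tick in enumerate(x_ticks)' loop (index is unused by the body)
def pvALoop (st : PySem.Dict Int Int × String × Int) (ix : Int × String) : PySem.Dict Int Int × String × Int :=
  let d := st.1
  let previous_label := st.2.1
  let label_index := st.2.2
  let current_label := ix.2
  let is_label_change := previous_label != current_label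
  let label_index := if is_label_change then label_index + 1 else label_index
  let d := if (d.size : Int) ≤ label_index then d.insert label_index (0 : Int) else d
  -- label_index_dict[label_index] += 1: the key is present here, so getD with default 0 is exact
  let d := d.insert label_index (d.getD label_index 0 + 1)
  (d, current_label, label_index)

def get_night_and_day_label_count (x_ticks : List String) : List (Int × Int) :=
  match PySem.List.pyGet? x_ticks 0 with
  | none => []   -- x_ticks[0] raises IndexError on []; excluded by Pre_
  | some first =>
    ((PySem.List.enumerate x_ticks 0).foldl pvALoop (PySem.Dict.empty, first, 0)).1.items

-- ===== PORT B =====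
-- the comprehension's condition 'i == 0 or x_ticks[i] != x_ticks[i - 1]'
-- (both indices are in range for every i the comprehension tests, so pyGet? is some there)
def pvBCond (x_ticks : List String) (i : Int) : Bool :=
  i == 0 || (PySem.List.pyGet? x_ticks i != PySem.List.pyGet? x_ticks (i - 1))

def get_night_and_day_label_count_alt (x_ticks : List String) : List (Int × Int) :=
  let n : Int := x_ticks.length
  let bounds := ((PySem.List.pyRange 0 n 1).filter (pvBCond x_ticks)) ++ [n]
  -- the dict comprehension is keyed by the enumerate index, so all keys are fresh and
  -- distinct: the dict's items are exactly the mapped (index, difference) pairs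
  (PySem.List.enumerate (List.zip bounds (bounds.drop 1)) 0).map (fun p => (p.1, p.2.2 - p.2.1))

-- ===== PRECONDITION & SPEC =====
-- Pre_ excludes only the empty list, on which A raises IndexError at x_ticks[0]
def Pre_get_night_and_day_label_count (x_ticks : List String) : Prop := x_ticks ≠ []
instance (x_ticks : List String) : Decidable (Pre_get_night_and_day_label_count x_ticks) := by unfold Pre_get_night_and_day_label_count; infer_instance
def pvWitness_get_night_and_day_label_count : List String := ["night", "night", "day"]

def Spec_get_night_and_day_label_count (x_ticks : List String) (out : List (Int × Int)) : Prop := out = get_night_and_day_label_count_alt x_ticks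
instance (x_ticks : List String) (out : List (Int × Int)) : Decidable (Spec_get_night_and_day_label_count x_ticks out) := by unfold Spec_get_night_and_day_label_count; infer_instance

-- ===== CLAIM (what is proved, stated in full; the proofs are below) =====
def Claim_equal_get_night_and_day_label_count : Prop := ∀ (x_ticks : List String), Dom_get_night_and_day_label_count x_ticks → Pre_get_night_and_day_label_count x_ticks → Spec_get_night_and_day_label_count x_ticks (get_night_and_day_label_count x_ticks)

-- ===== LEMMAS AND PROOFS =====

-- canonical enumeration: pvEnumFrom i [n₀, n₁, …] = [(i, n₀), (i+1, n₁), …]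
def pvEnumFrom : Int → List Int → List (Int × Int)
  | _, [] => []
  | i, n :: ns => (i, n) :: pvEnumFrom (i + 1) ns

-- canonical runs: the consecutive runs of (prev^m ++ rest) as (label, length) pairs
def pvRunPairs : String → Int → List String → List (String × Int)
  | prev, m, [] => [(prev, m)]
  | prev, m, x :: xs => if prev == x then pvRunPairs prev (m + 1) xs else (prev, m) :: pvRunPairs x 1 xs

-- run start positions (relative to s) of rest, the current run having started before s
def pvChg : Int → String → List String → List Int
  | _, _, [] => []
  | s, prev, x :: t => if prev == x then pvChg (s + 1) x t else s :: pvChg (s + 1) x t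

-- consecutive differences against a running previous bound
def pvDiffs : Int → List Int → List Int
  | _, [] => []
  | b, x :: xs => (x - b) :: pvDiffs x xs

theorem pvEnumFrom_length : ∀ (ns : List Int) (i : Int), (pvEnumFrom i ns).length = ns.length := by
  intro ns
  induction ns with
  | nil => intro i; rfl
  | cons n ns ih => intro i; simp [pvEnumFrom, ih]

theorem pvEnumFrom_append : ∀ (l1 l2 : List Int) (i : Int),
    pvEnumFrom i (l1 ++ l2) = pvEnumFrom i l1 ++ pvEnumFrom (i + l1.length) l2 := by
  intro l1
  induction l1 with
  | nil => intro l2 i; simp [pvEnumFrom]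
  | cons n ns ih =>
    intro l2 i
    simp [pvEnumFrom, ih]
    ring_nf

theorem pvEnumFrom_key_lt : ∀ (ns : List Int) (i : Int) (p : Int × Int),
    p ∈ pvEnumFrom i ns → p.1 < i + ns.length := by
  intro ns
  induction ns with
  | nil => intro i p h; simp [pvEnumFrom] at h
  | cons n ns ih =>
    intro i p h
    simp only [pvEnumFrom, List.mem_cons] at h
    rcases h with h | h
    · subst h
      simp only [List.length_cons]
      have : (0:Int) ≤ ns.length := Int.natCast_nonneg _
      push_cast
      omega
    · have := ih (i + 1) p h
      simp only [List.length_cons]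
      push_cast at this ⊢
      omega

-- get? skips a prefix whose keys all differ from the looked-up key
theorem pv_get?_skip : ∀ (E rest : List (Int × Int)) (k : Int), (∀ p ∈ E, p.1 ≠ k) →
    (PySem.Dict.mk (E ++ rest)).get? k = (PySem.Dict.mk rest).get? k := by
  intro E
  induction E with
  | nil => intro rest k _; rfl
  | cons p E ih =>
    intro rest k h
    rw [List.cons_append, PySem.Dict.get?_mk_cons]
    have hne : (p.1 == k) = false := by
      simp only [beq_eq_false_iff_ne]; exact h p (List.mem_cons_self)
    rw [hne]
    simp only [Bool.false_eq_true, if_false]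
    exact ih rest k (fun q hq => h q (List.mem_cons_of_mem _ hq))

theorem pv_get?_last (E : List (Int × Int)) (L m : Int) (hE : ∀ p ∈ E, p.1 ≠ L) :
    (PySem.Dict.mk (E ++ [(L, m)])).get? L = some m := by
  rw [pv_get?_skip E [(L, m)] L hE, PySem.Dict.get?_mk_cons]
  simp

theorem pv_getD_last (E : List (Int × Int)) (L m : Int) (hE : ∀ p ∈ E, p.1 ≠ L) :
    (PySem.Dict.mk (E ++ [(L, m)])).getD L 0 = m := by
  rw [PySem.Dict.getD_eq_get?_getD, pv_get?_last E L m hE]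
  rfl

theorem pv_insert_last (E : List (Int × Int)) (L m v : Int) (hE : ∀ p ∈ E, p.1 ≠ L) :
    ((PySem.Dict.mk (E ++ [(L, m)])).insert L v).items = E ++ [(L, v)] := by
  have hc : (PySem.Dict.mk (E ++ [(L, m)])).contains L = true := by
    rw [PySem.Dict.contains_eq_isSome_get?, pv_get?_last E L m hE]; rfl
  rw [PySem.Dict.items_insert_of_contains _ v hc]
  show (E ++ [(L, m)]).map _ = _
  rw [List.map_append]
  congr 1
  · have hcong : ∀ p ∈ E, (if (p.1 == L) = true then (L, v) else p) = p := by
      intro p hp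
      have : (p.1 == L) = false := by simp only [beq_eq_false_iff_ne]; exact hE p hp
      simp [this]
    calc E.map _ = E.map id := List.map_congr_left hcong
      _ = E := List.map_id E
  · simp

theorem pv_insert_fresh (l : List (Int × Int)) (k v : Int) (hl : ∀ p ∈ l, p.1 ≠ k) :
    ((PySem.Dict.mk l).insert k v).items = l ++ [(k, v)] := by
  have hn : (PySem.Dict.mk l).get? k = none := by
    have := pv_get?_skip l [] k hl
    simpa using this
  have hc : (PySem.Dict.mk l).contains k = false := by
    rw [PySem.Dict.contains_eq_isSome_get?, hn]; rfl
  rw [PySem.Dict.items_insert_of_not_contains _ v hc]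

-- the dict d as a literal Dict.mk of its items
theorem pv_dict_eq_mk (d : PySem.Dict Int Int) (l : List (Int × Int)) (h : d.items = l) :
    d = PySem.Dict.mk l := by
  apply PySem.Dict.ext
  simpa using h

-- fold of A's loop over enumerate ignores the index component
theorem pvA_fold_enum : ∀ (l : List String) (s : Int) (st : PySem.Dict Int Int × String × Int),
    (PySem.List.enumerate l s).foldl pvALoop st = l.foldl (fun st x => pvALoop st (0, x)) st := by
  intro l
  induction l with
  | nil => intro s st; rfl
  | cons x xs ih =>
    intro s st
    rw [PySem.List.enumerate_cons, List.foldl_cons, List.foldl_cons, ih]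
    have : pvALoop st (s, x) = pvALoop st (0, x) := rfl
    rw [this]

-- main invariant of A's loop: the dict always holds the enumerated finished run lengths
-- followed by the current (still growing) run's count at key ns.length
theorem pvA_inv : ∀ (rest : List String) (ns : List Int) (m : Int) (prev : String)
    (d : PySem.Dict Int Int), d.items = pvEnumFrom 0 ns ++ [((ns.length : Int), m)] →
    (rest.foldl (fun st x => pvALoop st (0, x)) (d, prev, (ns.length : Int))).1.items
      = pvEnumFrom 0 ns ++ pvEnumFrom (ns.length : Int) ((pvRunPairs prev m rest).map (·.2)) := by
  intro rest
  induction rest with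
  | nil =>
    intro ns m prev d hd
    simpa [pvRunPairs, pvEnumFrom] using hd
  | cons x xs ih =>
    intro ns m prev d hd
    have hd' : d = PySem.Dict.mk (pvEnumFrom 0 ns ++ [((ns.length : Int), m)]) :=
      pv_dict_eq_mk _ _ hd
    subst hd'
    have hEk : ∀ p ∈ pvEnumFrom 0 ns, p.1 ≠ (ns.length : Int) := by
      intro p hp
      have := pvEnumFrom_key_lt ns 0 p hp
      omega
    have hEk1 : ∀ p ∈ pvEnumFrom 0 ns ++ [((ns.length : Int), m)], p.1 ≠ (ns.length : Int) + 1 := by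
      intro p hp
      rcases List.mem_append.mp hp with hp | hp
      · have := pvEnumFrom_key_lt ns 0 p hp; omega
      · rw [List.mem_singleton] at hp
        subst hp
        simp only []
        omega
    have hsize : ((PySem.Dict.mk (pvEnumFrom 0 ns ++ [((ns.length : Int), m)])).size : Int)
        = (ns.length : Int) + 1 := by
      show ((pvEnumFrom 0 ns ++ [((ns.length : Int), m)]).length : Int) = _
      simp [pvEnumFrom_length]
    rw [List.foldl_cons]
    by_cases h : (prev == x) = true
    · -- same label: overwrite the current run's count at key ns.length
      have hpx : prev = x := eq_of_beq h
      have hcond : ¬ ((PySem.Dict.mk (pvEnumFrom 0 ns ++ [((ns.length : Int), m)])).size : Int)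
          ≤ (ns.length : Int) := by rw [hsize]; omega
      have hstep : pvALoop (PySem.Dict.mk (pvEnumFrom 0 ns ++ [((ns.length : Int), m)]), prev,
            (ns.length : Int)) (0, x)
          = ((PySem.Dict.mk (pvEnumFrom 0 ns ++ [((ns.length : Int), m)])).insert
              (ns.length : Int) (m + 1), x, (ns.length : Int)) := by
        simp [pvALoop, hpx, hcond, pv_getD_last _ _ _ hEk]
      rw [hstep]
      have hitems : ((PySem.Dict.mk (pvEnumFrom 0 ns ++ [((ns.length : Int), m)])).insert
            (ns.length : Int) (m + 1)).items
          = pvEnumFrom 0 ns ++ [((ns.length : Int), m + 1)] := pv_insert_last _ _ _ _ hEk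
      rw [ih ns (m + 1) x _ hitems]
      simp [pvRunPairs, hpx]
    · -- label change: append a fresh key ns.length + 1 with count 1
      have hcond : ((PySem.Dict.mk (pvEnumFrom 0 ns ++ [((ns.length : Int), m)])).size : Int)
          ≤ (ns.length : Int) + 1 := by rw [hsize]
      have hitems1 : ((PySem.Dict.mk (pvEnumFrom 0 ns ++ [((ns.length : Int), m)])).insert
            ((ns.length : Int) + 1) 0).items
          = (pvEnumFrom 0 ns ++ [((ns.length : Int), m)]) ++ [((ns.length : Int) + 1, 0)] :=
        pv_insert_fresh _ _ _ hEk1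
      have hd1 : (PySem.Dict.mk (pvEnumFrom 0 ns ++ [((ns.length : Int), m)])).insert
            ((ns.length : Int) + 1) 0
          = PySem.Dict.mk ((pvEnumFrom 0 ns ++ [((ns.length : Int), m)]) ++ [((ns.length : Int) + 1, 0)]) :=
        pv_dict_eq_mk _ _ hitems1
      have hpx : ¬ prev = x := by simpa using h
      have hg := pv_getD_last (pvEnumFrom 0 ns ++ [((ns.length : Int), m)]) ((ns.length : Int) + 1)
        0 hEk1
      simp only [List.append_assoc, List.cons_append, List.nil_append] at hg
      have hstep : pvALoop (PySem.Dict.mk (pvEnumFrom 0 ns ++ [((ns.length : Int), m)]), prev,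
            (ns.length : Int)) (0, x)
          = ((PySem.Dict.mk ((pvEnumFrom 0 ns ++ [((ns.length : Int), m)]) ++ [((ns.length : Int) + 1, 0)])).insert
              ((ns.length : Int) + 1) 1, x, (ns.length : Int) + 1) := by
        simp [pvALoop, hpx, hcond, hd1, hg]
      rw [hstep]
      have hitems2 : ((PySem.Dict.mk ((pvEnumFrom 0 ns ++ [((ns.length : Int), m)])
            ++ [((ns.length : Int) + 1, 0)])).insert ((ns.length : Int) + 1) 1).items
          = pvEnumFrom 0 (ns ++ [m]) ++ [(((ns ++ [m]).length : Int), 1)] := by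
        rw [pv_insert_last _ _ _ _ hEk1, pvEnumFrom_append]
        simp [pvEnumFrom]
      have hlen : ((ns ++ [m]).length : Int) = (ns.length : Int) + 1 := by
        simp
      have := ih (ns ++ [m]) 1 x _ hitems2
      rw [hlen] at this
      rw [this, pvEnumFrom_append]
      simp [pvRunPairs, h, pvEnumFrom]

-- B's filtered range is exactly the relative run start positions
theorem pvB_filter : ∀ (rest pre : List String) (prev : String),
    (PySem.List.pyRange ((pre.length : Int) + 1) ((pre.length : Int) + 1 + rest.length) 1).filter
        (pvBCond (pre ++ prev :: rest))
      = pvChg ((pre.length : Int) + 1) prev rest := by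
  intro rest
  induction rest with
  | nil =>
    intro pre prev
    rw [PySem.List.pyRange_one_eq_nil (by simp)]
    rfl
  | cons x t ih =>
    intro pre prev
    have hlt : (pre.length : Int) + 1 < (pre.length : Int) + 1 + ((x :: t).length : Int) := by
      simp only [List.length_cons]
      push_cast
      omega
    rw [PySem.List.pyRange_one_cons hlt, List.filter_cons]
    have hs : ((pre.length : Int) + 1) = (((pre.length + 1 : Nat) : Int)) := by push_cast; ring
    have hgx : PySem.List.pyGet? (pre ++ prev :: x :: t) ((pre.length : Int) + 1) = some x := by
      rw [hs, PySem.List.pyGet?_natCast]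
      rw [List.getElem?_append_right (by omega)]
      simp
    have hgp : PySem.List.pyGet? (pre ++ prev :: x :: t) ((pre.length : Int) + 1 - 1) = some prev := by
      have : (pre.length : Int) + 1 - 1 = ((pre.length : Nat) : Int) := by ring
      rw [this, PySem.List.pyGet?_natCast]
      rw [List.getElem?_append_right (by omega)]
      simp
    have hcond : pvBCond (pre ++ prev :: x :: t) ((pre.length : Int) + 1) = !(prev == x) := by
      unfold pvBCond
      rw [hgx, hgp]
      have h0 : (((pre.length : Int) + 1) == 0) = false := by
        simp only [beq_eq_false_iff_ne]; omega
      rw [h0]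
      have hbeq : ((some x : Option String) == some prev) = (prev == x) := by
        by_cases hpe : prev = x
        · subst hpe; simp
        · simp [hpe, Ne.symm hpe]
      simp only [Bool.false_or, bne, hbeq]
    have hrec := ih (pre ++ [prev]) x
    have hxs : (pre ++ [prev]) ++ x :: t = pre ++ prev :: x :: t := by simp
    have hlen : (((pre ++ [prev]).length : Int) + 1) = (pre.length : Int) + 1 + 1 := by
      simp only [List.length_append, List.length_cons, List.length_nil]
      push_cast
      ring
    rw [hxs, hlen] at hrec
    have hend : (pre.length : Int) + 1 + ((x :: t).length : Int)
        = ((pre.length : Int) + 1 + 1) + (t.length : Int) := by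
      simp only [List.length_cons]; push_cast; ring
    by_cases h : (prev == x) = true
    · rw [hcond, h]
      simp only [Bool.not_true, Bool.false_eq_true, if_false]
      rw [show pvChg ((pre.length : Int) + 1) prev (x :: t)
            = pvChg ((pre.length : Int) + 1 + 1) x t by simp [pvChg, h]]
      rw [← hrec, hend]
    · rw [hcond, eq_false_of_ne_true h]
      simp only [Bool.not_false, if_true]
      rw [show pvChg ((pre.length : Int) + 1) prev (x :: t)
            = ((pre.length : Int) + 1) :: pvChg ((pre.length : Int) + 1 + 1) x t by
        simp [pvChg, h]]
      rw [← hrec, hend]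

-- the pairwise differences of the boundary list are the run lengths
theorem pvB_diffs : ∀ (rest : List String) (prev : String) (m s : Int),
    pvDiffs (s - m) (pvChg s prev rest ++ [s + rest.length])
      = (pvRunPairs prev m rest).map (·.2) := by
  intro rest
  induction rest with
  | nil =>
    intro prev m s
    simp [pvChg, pvDiffs, pvRunPairs]
  | cons x t ih =>
    intro prev m s
    by_cases h : (prev == x) = true
    · have hpx := eq_of_beq h
      subst hpx
      have := ih prev (m + 1) (s + 1)
      rw [show s + 1 - (m + 1) = s - m by ring] at this
      simp only [pvChg, pvRunPairs, h, if_true, List.length_cons]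
      push_cast
      rw [show s + ((t.length : Int) + 1) = s + 1 + (t.length : Int) by ring, this]
    · have := ih x 1 (s + 1)
      rw [show s + 1 - 1 = s by ring] at this
      simp only [pvChg, pvRunPairs, h, Bool.false_eq_true, if_false, List.length_cons,
        List.cons_append, List.map_cons]
      push_cast
      rw [show pvDiffs (s - m) (s :: (pvChg (s + 1) x t ++ [s + ((t.length : Int) + 1)]))
            = (s - (s - m)) :: pvDiffs s (pvChg (s + 1) x t ++ [s + ((t.length : Int) + 1)]) from rfl]
      rw [show s + ((t.length : Int) + 1) = s + 1 + (t.length : Int) by ring, this]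
      congr 1
      ring

-- enumerating the zipped boundary list produces the enumerated differences
theorem pvB_zip_enum : ∀ (bs : List Int) (b s : Int),
    (PySem.List.enumerate (List.zip (b :: bs) bs) s).map (fun p => (p.1, p.2.2 - p.2.1))
      = pvEnumFrom s (pvDiffs b bs) := by
  intro bs
  induction bs with
  | nil => intro b s; rfl
  | cons c cs ih =>
    intro b s
    rw [show List.zip (b :: c :: cs) (c :: cs) = (b, c) :: List.zip (c :: cs) cs from rfl]
    rw [PySem.List.enumerate_cons, List.map_cons, ih c (s + 1)]
    rfl

-- ===== VERDICT (by name: the statement is the Claim_ definition above) =====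
theorem get_night_and_day_label_count_spec : Claim_equal_get_night_and_day_label_count := by
  intro x_ticks _ hpre
  unfold Spec_get_night_and_day_label_count
  match x_ticks with
  | [] => exact absurd rfl hpre
  | h :: t =>
    -- A's side
    have hA : get_night_and_day_label_count (h :: t)
        = pvEnumFrom 0 ((pvRunPairs h 1 t).map (·.2)) := by
      have hget : PySem.List.pyGet? (h :: t) 0 = some h := by
        simp [PySem.List.pyGet?, PySem.List.pyIdx?]
      unfold get_night_and_day_label_count
      rw [hget]
      show ((PySem.List.enumerate (h :: t) 0).foldl pvALoop
        (PySem.Dict.empty, h, 0)).1.items = _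
      rw [pvA_fold_enum, List.foldl_cons]
      have hfirst : pvALoop (PySem.Dict.empty, h, 0) (0, h)
          = (PySem.Dict.mk [((0 : Int), (1 : Int))], h, 0) := by
        simp [pvALoop]
        rfl
      rw [hfirst]
      have h0 : ((List.length ([] : List Int) : Int)) = 0 := rfl
      have := pvA_inv t [] 1 h (PySem.Dict.mk [((0 : Int), (1 : Int))]) (by simp [pvEnumFrom])
      rw [h0] at this
      rw [this]
      simp [pvEnumFrom]
    -- B's side
    have hB : get_night_and_day_label_count_alt (h :: t)
        = pvEnumFrom 0 ((pvRunPairs h 1 t).map (·.2)) := by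
      unfold get_night_and_day_label_count_alt
      have hn : (((h :: t).length : Int)) = (t.length : Int) + 1 := by
        simp
      have hfilter : (PySem.List.pyRange 0 ((h :: t).length : Int) 1).filter (pvBCond (h :: t))
          = 0 :: pvChg 1 h t := by
        rw [hn, PySem.List.pyRange_one_cons (by omega), List.filter_cons]
        have hc0 : pvBCond (h :: t) 0 = true := by
          unfold pvBCond; rfl
        rw [hc0]
        simp only [if_true]
        have := pvB_filter t [] h
        simp only [List.length_nil, Int.natCast_zero, List.nil_append, zero_add] at this
        rw [show (t.length : Int) + 1 = 1 + (t.length : Int) by ring, ← this]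
        norm_num
      simp only [hfilter, List.cons_append, List.drop_succ_cons, List.drop_zero]
      rw [pvB_zip_enum (pvChg 1 h t ++ [((h :: t).length : Int)]) 0 0]
      rw [show ((h :: t).length : Int) = 1 + (t.length : Int) by simp; ring]
      rw [show (0 : Int) = 1 - 1 from rfl]
      rw [pvB_diffs t h 1 1]
    rw [hA, hB]
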